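-- pv_equiv track=rewrite | github.com/Sayeem2004/CodingBat | Python/p268949.py | myInt
-- ===== SOURCE A (Python) =====
-- def myInt(s):
--   x = len(s) - 1
--   y = 0
--   z = 1
--   for i in s:
--     if i == "-":
--       z = -1
--       x = x - 1
--     else:
--       n = ord(i) - 48
--       n = n * 10**x
--       x = x - 1
--       y = y + n
--   return y * z
-- ===== SOURCE B (Python) =====
-- def myInt(s):
--     y = 0
--     p = 1
--     for c in reversed(s):
--         if c != "-":
--             y += (ord(c) - 48) * p
--         p *= 10
--     return -y if "-" in s else y
-- ===== Notes on version B (the rewrite author's own statement) =====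
-- stated objective: faster
-- what changed: Single right-to-left pass keeping a running place value p (p *= 10 per character) instead of recomputing 10**x from scratch for every character; the sign is decided by a membership test instead of loop state.
import Mathlib
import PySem

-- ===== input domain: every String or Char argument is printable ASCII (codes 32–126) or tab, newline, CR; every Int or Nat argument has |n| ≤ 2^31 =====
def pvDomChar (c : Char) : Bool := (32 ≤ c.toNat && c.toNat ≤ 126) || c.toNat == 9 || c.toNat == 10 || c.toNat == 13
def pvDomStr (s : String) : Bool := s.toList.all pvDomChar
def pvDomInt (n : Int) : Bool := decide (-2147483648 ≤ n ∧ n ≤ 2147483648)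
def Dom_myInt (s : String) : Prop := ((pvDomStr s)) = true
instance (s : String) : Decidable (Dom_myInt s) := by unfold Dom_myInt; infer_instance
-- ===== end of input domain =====

-- B scans the string right-to-left with a running place value (p *= 10) and a separate
-- membership test for the sign, instead of A's per-character 10**x power and sign flag.

-- ===== PORT A =====
-- state (x, y, z); Python's 10**x: x = len-1-k at index k is always ≥ 0 when used, so 10 ^ x.toNat is exact here
def myIntStepA (st : Int × Int × Int) (c : Char) : Int × Int × Int :=
  if c = '-' then (st.1 - 1, st.2.1, -1)
  else (st.1 - 1, st.2.1 + ((c.toNat : Int) - 48) * 10 ^ st.1.toNat, st.2.2)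

def myInt (s : String) : Int :=
  let st := s.toList.foldl myIntStepA ((s.toList.length : Int) - 1, 0, 1)
  st.2.1 * st.2.2

-- ===== PORT B =====
-- Source B: reversed(s) traversal, state (y, p); '-' contributes no digit but still advances the place
def myIntStepB (st : Int × Int) (c : Char) : Int × Int :=
  if c ≠ '-' then (st.1 + ((c.toNat : Int) - 48) * st.2, st.2 * 10)
  else (st.1, st.2 * 10)

def myInt_alt (s : String) : Int :=
  let st := s.toList.reverse.foldl myIntStepB (0, 1)
  if '-' ∈ s.toList then -st.1 else st.1

-- ===== PRECONDITION & SPEC =====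
def Spec_myInt (s : String) (out : Int) : Prop := out = myInt_alt s
instance (s : String) (out : Int) : Decidable (Spec_myInt s out) := by unfold Spec_myInt; infer_instance

-- ===== CLAIM (what is proved, stated in full; the proofs are below) =====
def Claim_equal_myInt : Prop := ∀ (s : String), Dom_myInt s → Spec_myInt s (myInt s)

-- ===== LEMMAS AND PROOFS =====

-- B's reversed foldl as a foldr over the original list
theorem altB_foldr (l : List Char) :
    l.reverse.foldl myIntStepB (0, 1) = l.foldr (fun c st => myIntStepB st c) (0, 1) := by
  rw [List.foldl_reverse]

-- the place accumulator is 10^length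
theorem foldrB_snd (l : List Char) :
    (l.foldr (fun c st => myIntStepB st c) (0, 1)).2 = 10 ^ l.length := by
  induction l with
  | nil => simp
  | cons c t ih =>
    rw [List.foldr_cons]
    rcases hB : t.foldr (fun c st => myIntStepB st c) ((0 : Int), (1 : Int)) with ⟨yt, pt⟩
    rw [hB] at ih
    simp only [myIntStepB]
    split_ifs <;> simp_all [pow_succ, mul_comm]

-- A's fold from (len-1, y0, z0) = (-1, y0 + B's magnitude, updated sign)
theorem foldA_eq (l : List Char) (y0 z0 : Int) :
    l.foldl myIntStepA ((l.length : Int) - 1, y0, z0) =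
      (-1, y0 + (l.foldr (fun c st => myIntStepB st c) (0, 1)).1,
        if '-' ∈ l then -1 else z0) := by
  induction l generalizing y0 z0 with
  | nil => simp
  | cons c t ih =>
    have hx : (((t.length + 1 : Nat) : Int)) - 1 - 1 = (t.length : Int) - 1 := by push_cast; ring
    have hp := foldrB_snd t
    rw [List.foldl_cons, List.foldr_cons]
    rcases hB : t.foldr (fun c st => myIntStepB st c) ((0 : Int), (1 : Int)) with ⟨yt, pt⟩
    rw [hB] at hp
    simp only at hp
    simp only [List.length_cons, myIntStepA, myIntStepB]
    by_cases h : c = '-'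
    · simp only [h, ite_true, ne_eq, not_true_eq_false, ite_false, hx]
      rw [ih y0 (-1), hB]
      simp
    · have ht : ((((t.length + 1 : Nat) : Int)) - 1).toNat = t.length := by omega
      have hm : ('-' ∈ (c :: t)) ↔ ('-' ∈ t) := by
        constructor
        · intro hmem
          rcases List.mem_cons.mp hmem with hc | hmem
          · exact (h hc.symm).elim
          · exact hmem
        · intro hmem; exact List.mem_cons_of_mem _ hmem
      simp only [h, ite_false, ne_eq, not_false_eq_true, ite_true, hx, ht]
      rw [ih (y0 + ((c.toNat : Int) - 48) * 10 ^ t.length) z0, hB]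
      refine Prod.ext rfl (Prod.ext ?_ ?_)
      · simp only
        rw [hp]; ring
      · simp [hm]

-- ===== VERDICT (by name: the statement is the Claim_ definition above) =====
theorem myInt_spec : Claim_equal_myInt := by
  intro s _
  unfold Spec_myInt myInt myInt_alt
  rw [foldA_eq, altB_foldr]
  by_cases h : '-' ∈ s.toList <;> simp [h]
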